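-- pv_equiv track=rewrite | github.com/xSLiveGit/ReStockify | db/PEP/process.py | get_category_for_value
-- ===== SOURCE A (Python) =====
-- def get_category_for_value(value_name):
--     income_statement_keys = ["revenue",
--                              "total-cogs",
--                              "operating-expense",
--                              "interest-expense",
--                              "net-income",
--                              "eps-basic",
--                              "shares-outstanding-basic"]
--
--     balance_sheet_keys = ["cash-and-equivalents",
--                           "total-assets",
--                           "short-term-debt",
--                           "long-term-debt",
--                           "total-liabilities"]
--
--     cash_flow_statement_keys = ["operating-cash-flow",
--                                 "investing-cash-flow",
--                                 "capital-expenditure",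
--                                 "financing-cash-flow",
--                                 "dividends-paid",
--                                 "dividends-per-share"]
--
--     financial_rations_keys = ["avg-share-price"]
--
--     name_values_maping = {
--         "income-statement":income_statement_keys,
--         "balance-sheet":balance_sheet_keys,
--         "cash-flow-statement":cash_flow_statement_keys,
--         "financial-ratios": financial_rations_keys
--     }
--
--     for key, value in name_values_maping.items():
--         if value_name in value:
--             return key
--
--     raise Exception("Unknown key " + value_name)
-- ===== SOURCE B (Python) =====
-- # B: table of (name, category) pairs stored in sorted order, answered by binary search.
-- _SORTED_NAME_CATEGORY = [
--     ("avg-share-price", "financial-ratios"),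
--     ("capital-expenditure", "cash-flow-statement"),
--     ("cash-and-equivalents", "balance-sheet"),
--     ("dividends-paid", "cash-flow-statement"),
--     ("dividends-per-share", "cash-flow-statement"),
--     ("eps-basic", "income-statement"),
--     ("financing-cash-flow", "cash-flow-statement"),
--     ("interest-expense", "income-statement"),
--     ("investing-cash-flow", "cash-flow-statement"),
--     ("long-term-debt", "balance-sheet"),
--     ("net-income", "income-statement"),
--     ("operating-cash-flow", "cash-flow-statement"),
--     ("operating-expense", "income-statement"),
--     ("revenue", "income-statement"),
--     ("shares-outstanding-basic", "income-statement"),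
--     ("short-term-debt", "balance-sheet"),
--     ("total-assets", "balance-sheet"),
--     ("total-cogs", "income-statement"),
--     ("total-liabilities", "balance-sheet"),
-- ]
--
-- def get_category_for_value(value_name):
--     lo, hi = 0, len(_SORTED_NAME_CATEGORY)
--     while lo < hi:
--         mid = (lo + hi) // 2
--         name, category = _SORTED_NAME_CATEGORY[mid]
--         if name < value_name:
--             lo = mid + 1
--         elif value_name < name:
--             hi = mid
--         else:
--             return category
--     raise Exception("Unknown key " + value_name)
-- ===== Notes on version B (the rewrite author's own statement) =====
-- stated objective: alternative
-- what changed: B stores the (name, category) pairs as one sorted array and answers with a binary search over it, instead of A's linear membership scans over four per-category lists; names are unique so the lookup result is identical.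
import Mathlib
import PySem

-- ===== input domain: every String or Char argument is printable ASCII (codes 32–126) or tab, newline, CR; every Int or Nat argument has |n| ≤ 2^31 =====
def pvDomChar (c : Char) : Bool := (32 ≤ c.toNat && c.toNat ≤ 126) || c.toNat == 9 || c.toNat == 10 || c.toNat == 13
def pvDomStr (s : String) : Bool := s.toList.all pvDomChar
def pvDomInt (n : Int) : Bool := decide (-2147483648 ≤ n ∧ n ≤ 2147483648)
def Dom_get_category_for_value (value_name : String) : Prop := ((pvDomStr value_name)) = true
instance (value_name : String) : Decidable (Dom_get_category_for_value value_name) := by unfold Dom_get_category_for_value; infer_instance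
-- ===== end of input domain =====

-- B answers with a binary search over one sorted (name, category) array instead of A's
-- linear membership scans over four per-category lists; objective: alternative lookup algorithm.
-- Both programs raise the same exception on unknown names; Pre_ excludes exactly those inputs.

-- ===== PORT A =====
-- A's loop over name_values_maping.items(): return the first category whose list contains value_name; none = raise
def pvA_loop (value_name : String) : List (String × List String) → Option String
  | [] => none
  | (key, value) :: rest =>
      if value_name ∈ value then some key else pvA_loop value_name rest

def get_category_for_value (value_name : String) : String :=
  let income_statement_keys := ["revenue", "total-cogs", "operating-expense", "interest-expense",
    "net-income", "eps-basic", "shares-outstanding-basic"]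
  let balance_sheet_keys := ["cash-and-equivalents", "total-assets", "short-term-debt",
    "long-term-debt", "total-liabilities"]
  let cash_flow_statement_keys := ["operating-cash-flow", "investing-cash-flow",
    "capital-expenditure", "financing-cash-flow", "dividends-paid", "dividends-per-share"]
  let financial_rations_keys := ["avg-share-price"]
  let name_values_maping : PySem.Dict String (List String) :=
    PySem.Dict.mk [("income-statement", income_statement_keys),
     ("balance-sheet", balance_sheet_keys),
     ("cash-flow-statement", cash_flow_statement_keys),
     ("financial-ratios", financial_rations_keys)]
  match pvA_loop value_name name_values_maping.items with
  | some key => key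
  | none => ""   -- Python raises Exception here; excluded by Pre_

-- ===== PORT B =====
-- Source B's sorted literal table of (name, category) pairs
def pvB_sorted_name_category : List (String × String) :=
  [("avg-share-price", "financial-ratios"),
   ("capital-expenditure", "cash-flow-statement"),
   ("cash-and-equivalents", "balance-sheet"),
   ("dividends-paid", "cash-flow-statement"),
   ("dividends-per-share", "cash-flow-statement"),
   ("eps-basic", "income-statement"),
   ("financing-cash-flow", "cash-flow-statement"),
   ("interest-expense", "income-statement"),
   ("investing-cash-flow", "cash-flow-statement"),
   ("long-term-debt", "balance-sheet"),
   ("net-income", "income-statement"),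
   ("operating-cash-flow", "cash-flow-statement"),
   ("operating-expense", "income-statement"),
   ("revenue", "income-statement"),
   ("shares-outstanding-basic", "income-statement"),
   ("short-term-debt", "balance-sheet"),
   ("total-assets", "balance-sheet"),
   ("total-cogs", "income-statement"),
   ("total-liabilities", "balance-sheet")]

-- Source B's while-loop binary search, made structural with a fuel bound (fuel ≥ list length suffices)
def pvB_bsearch (value_name : String) (fuel lo hi : Nat) : Option String :=
  match fuel with
  | 0 => none
  | f + 1 =>
      if lo < hi then
        let mid := (lo + hi) / 2
        let p := pvB_sorted_name_category.getD mid ("", "")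
        -- Python's 'name < value_name' on str is exactly PySem.Chars.strLt on the char lists
        if PySem.Chars.strLt p.1.toList value_name.toList then pvB_bsearch value_name f (mid + 1) hi
        else if PySem.Chars.strLt value_name.toList p.1.toList then pvB_bsearch value_name f lo mid
        else some p.2
      else none

def get_category_for_value_alt (value_name : String) : String :=
  match pvB_bsearch value_name pvB_sorted_name_category.length 0 pvB_sorted_name_category.length with
  | some category => category
  | none => ""   -- Python raises Exception here; excluded by Pre_

-- ===== PRECONDITION & SPEC =====
-- Pre_ excludes exactly the unknown names, on which A (and B alike) raises an exception.
def Pre_get_category_for_value (value_name : String) : Prop :=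
  value_name ∈ ["revenue", "total-cogs", "operating-expense", "interest-expense", "net-income",
    "eps-basic", "shares-outstanding-basic", "cash-and-equivalents", "total-assets",
    "short-term-debt", "long-term-debt", "total-liabilities", "operating-cash-flow",
    "investing-cash-flow", "capital-expenditure", "financing-cash-flow", "dividends-paid",
    "dividends-per-share", "avg-share-price"]
instance (value_name : String) : Decidable (Pre_get_category_for_value value_name) := by
  unfold Pre_get_category_for_value; infer_instance

def pvWitness_get_category_for_value : String := "net-income"

def Spec_get_category_for_value (value_name : String) (out : String) : Prop := out = get_category_for_value_alt value_name
instance (value_name : String) (out : String) : Decidable (Spec_get_category_for_value value_name out) := by unfold Spec_get_category_for_value; infer_instance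

-- ===== CLAIM (what is proved, stated in full; the proofs are below) =====
def Claim_equal_get_category_for_value : Prop := ∀ (value_name : String), Dom_get_category_for_value value_name → Pre_get_category_for_value value_name → Spec_get_category_for_value value_name (get_category_for_value value_name)

-- ===== LEMMAS AND PROOFS =====

-- ===== VERDICT (by name: the statement is the Claim_ definition above) =====
theorem get_category_for_value_spec : Claim_equal_get_category_for_value := by
  intro s _ hpre
  unfold Pre_get_category_for_value at hpre
  unfold Spec_get_category_for_value
  simp only [List.mem_cons, List.not_mem_nil, or_false] at hpre
  rcases hpre with h|h|h|h|h|h|h|h|h|h|h|h|h|h|h|h|h|h|h <;> subst h <;> decide
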